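-- pv_equiv track=rewrite | github.com/cooperative-computing-lab/pledge | src/pledge_tracer.py | build_process_tree
-- ===== SOURCE A (Python) =====
-- def build_process_tree(pid_dep):
--     # Find root processes (those that don't appear as children)
--     all_children = set()
--     for children in pid_dep.values():
--         all_children.update(children.keys())
--
--     roots = [pid for pid in pid_dep.keys() if pid not in all_children]
--
--     # may reach max recursion depth
--     def build_subtree(pid, level=0):
--         tree = [(pid, level)]
--         if pid in pid_dep:
--             for child in sorted(pid_dep[pid].keys(), key=lambda x: int(x) if str(x).isdigit() else 0):
--                 tree.extend(build_subtree(child, level + 1))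
--         return tree
--
--     full_tree = []
--     for root in sorted(roots, key=lambda x: int(x) if str(x).isdigit() else 0):
--         full_tree.extend(build_subtree(root))
--
--     return full_tree
-- ===== SOURCE B (Python) =====
-- def build_process_tree(pid_dep):
--     key = lambda x: int(x) if str(x).isdigit() else 0
--
--     # Index built once: each parent mapped to its child pids, pre-sorted.
--     kids = {p: sorted(children, key=key) for p, children in pid_dep.items()}
--     all_children = {c for cs in kids.values() for c in cs}
--
--     stack = [(r, 0) for r in sorted((p for p in kids if p not in all_children), key=key)]
--     stack.reverse()
--     out = []
--     while stack:
--         pid, level = stack.pop()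
--         out.append((pid, level))
--         for c in reversed(kids.get(pid, [])):
--             stack.append((c, level + 1))
--     return out
-- ===== Notes on version B (the rewrite author's own statement) =====
-- stated objective: alternative
-- what changed: Replaces A's recursive build_subtree (which looks up and sorts each node's children during the recursion and copies every subtree list into its parent via tree.extend) by a pre-built dict index of sorted child lists, a flat set comprehension for all_children, and an iterative explicit-stack preorder loop that appends each (pid, level) once.
import Mathlib
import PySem

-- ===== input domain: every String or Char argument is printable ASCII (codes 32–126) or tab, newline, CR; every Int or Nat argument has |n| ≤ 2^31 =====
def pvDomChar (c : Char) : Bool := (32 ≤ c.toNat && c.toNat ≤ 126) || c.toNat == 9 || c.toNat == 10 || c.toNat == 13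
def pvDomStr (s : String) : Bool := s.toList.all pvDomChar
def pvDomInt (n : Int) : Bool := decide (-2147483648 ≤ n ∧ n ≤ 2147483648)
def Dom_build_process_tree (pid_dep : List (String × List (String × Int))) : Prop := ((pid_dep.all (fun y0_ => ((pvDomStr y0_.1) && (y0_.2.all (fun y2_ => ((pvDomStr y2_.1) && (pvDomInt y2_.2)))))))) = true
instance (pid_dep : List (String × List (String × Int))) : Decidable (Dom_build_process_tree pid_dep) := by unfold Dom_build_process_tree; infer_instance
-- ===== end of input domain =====

-- B replaces A's recursive subtree construction (per-node child lookup + sort inside the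
-- recursion) by a dict index of pre-sorted child lists built once, a flat set comprehension
-- for all_children, and an iterative explicit-stack preorder loop (objective: alternative).

-- ===== PORT A =====
-- the sort key 'int(x) if str(x).isdigit() else 0' (both Pythons contain this lambda).
-- int(x) on an isdigit-true string never raises, so '(….getD 0)' is only type plumbing.
def bpt_key (x : String) : Int :=
  if PySem.Str.strIsdigit x then (PySem.Int.ofStr? x).getD 0 else 0

-- A's 'build_subtree(pid, level)' with a Nat depth-fuel as totality guard only: A's recursion
-- depth is at most the number of keys on every input Pre_ admits, so fuel pid_dep.length + 1
-- is never exhausted there.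
def bpt_subtree (d : PySem.Dict String (List (String × Int))) : Nat → String → Int → List (String × Int)
  | 0, pid, level => [(pid, level)]
  | fuel+1, pid, level =>
    match d.get? pid with
    | some children =>
        (PySem.List.sorted (PySem.Dict.keys (PySem.Dict.ofList children)) bpt_key).foldl
          (fun tree child => tree ++ bpt_subtree d fuel child (level + 1)) [(pid, level)]
    | none => [(pid, level)]

def build_process_tree (pid_dep : List (String × List (String × Int))) : List (String × Int) :=
  let d := PySem.Dict.ofList pid_dep
  let all_children := d.values.foldl
    (fun s children => PySem.Set.update s (PySem.Dict.keys (PySem.Dict.ofList children)))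
    (PySem.Set.empty : PySem.Set String)
  let roots := (PySem.Dict.keys d).filter (fun pid => !(PySem.Set.contains all_children pid))
  (PySem.List.sorted roots bpt_key).foldl
    (fun full_tree root => full_tree ++ bpt_subtree d (pid_dep.length + 1) root 0) []

-- ===== PORT B =====
-- B's dict comprehension '{p: sorted(children, key=key) for p, children in pid_dep.items()}'
def bpt_index (pid_dep : List (String × List (String × Int))) : PySem.Dict String (List String) :=
  PySem.Dict.ofList (((PySem.Dict.ofList pid_dep).items).map
    (fun kv => (kv.1, PySem.List.sorted (PySem.Dict.keys (PySem.Dict.ofList kv.2)) bpt_key)))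

-- B's 'while stack' loop; the Lean list head is the Python stack TOP (the list's end), so
-- Python's reversed pushes appear here as the pre-sorted child list prepended head-first.
-- The Nat argument is a step-count totality guard only (B's loop runs at most as many steps
-- as the output is long on every input Pre_ admits).
def bpt_loop (kids : PySem.Dict String (List String)) : Nat → List (String × Int) → List (String × Int)
  | 0, _ => []
  | _+1, [] => []
  | fuel+1, (pid, level) :: stack =>
    (pid, level) :: bpt_loop kids fuel ((kids.getD pid []).map (fun c => (c, level + 1)) ++ stack)

-- upper bound used only to size B's step-count fuel
def bpt_size (pid_dep : List (String × List (String × Int))) : Nat :=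
  pid_dep.foldl (fun a kv => a + kv.2.length) 1

def build_process_tree_alt (pid_dep : List (String × List (String × Int))) : List (String × Int) :=
  let kids := bpt_index pid_dep
  let all_children : PySem.Set String := PySem.Set.ofList (kids.values.flatMap (fun cs => cs))
  let stack := (PySem.List.sorted
      (kids.keys.filter (fun p => !(PySem.Set.contains all_children p))) bpt_key).map
    (fun r => (r, (0 : Int)))
  bpt_loop kids ((stack.length + 1) * (bpt_size pid_dep) ^ (pid_dep.length + 1)) stack

-- ===== PRECONDITION & SPEC =====
-- child pids of p (keys of the child dict), [] when p is not a key
def bpt_childKeys (pid_dep : List (String × List (String × Int))) (p : String) : List String :=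
  match (PySem.Dict.ofList pid_dep).get? p with
  | some children => PySem.Dict.keys (PySem.Dict.ofList children)
  | none => []

-- Kahn-style eliminability: p is eliminable in ≤ i rounds if all of its child keys are
-- eliminable in ≤ i-1 rounds (a key on a cycle is never eliminable).
def bpt_elim (pid_dep : List (String × List (String × Int))) : Nat → String → Bool
  | 0, _ => false
  | i+1, p => (bpt_childKeys pid_dep p).all
      (fun c => !((PySem.Dict.ofList pid_dep).contains c) || bpt_elim pid_dep i c)

-- pids reachable from s in ≤ i child steps
def bpt_reach (pid_dep : List (String × List (String × Int))) : Nat → PySem.Set String → PySem.Set String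
  | 0, s => s
  | i+1, s => bpt_reach pid_dep i
      (s.foldl (fun t p => PySem.Set.update t (bpt_childKeys pid_dep p)) s)

-- the root pids (keys that appear in no child dict), as A computes them
def bpt_roots (pid_dep : List (String × List (String × Int))) : List String :=
  let d := PySem.Dict.ofList pid_dep
  let all_children := d.values.foldl
    (fun s children => PySem.Set.update s (PySem.Dict.keys (PySem.Dict.ofList children)))
    (PySem.Set.empty : PySem.Set String)
  (PySem.Dict.keys d).filter (fun pid => !(PySem.Set.contains all_children pid))

-- Pre_ excludes exactly the inputs with a dependency cycle reachable from a root: there A's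
-- unbounded recursion raises RecursionError (and B's Python loops forever), so neither returns.
-- It is a graph condition on the input (every reachable key is Kahn-eliminable), not a rerun
-- of either algorithm.
def Pre_build_process_tree (pid_dep : List (String × List (String × Int))) : Prop :=
  ∀ p ∈ PySem.Dict.keys (PySem.Dict.ofList pid_dep),
    p ∈ bpt_reach pid_dep (bpt_size pid_dep + pid_dep.length + 1) (PySem.Set.ofList (bpt_roots pid_dep)) →
    bpt_elim pid_dep pid_dep.length p = true

instance (pid_dep : List (String × List (String × Int))) : Decidable (Pre_build_process_tree pid_dep) := by
  unfold Pre_build_process_tree; infer_instance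

def pvWitness_build_process_tree : (List (String × List (String × Int))) :=
  [("1", [("2", 0)])]

def Spec_build_process_tree (pid_dep : List (String × List (String × Int))) (out : List (String × Int)) : Prop := out = build_process_tree_alt pid_dep
instance (pid_dep : List (String × List (String × Int))) (out : List (String × Int)) : Decidable (Spec_build_process_tree pid_dep out) := by unfold Spec_build_process_tree; infer_instance

-- ===== CLAIM (what is proved, stated in full; the proofs are below) =====
def Claim_equal_build_process_tree : Prop := ∀ (pid_dep : List (String × List (String × Int))), Dom_build_process_tree pid_dep → Pre_build_process_tree pid_dep → Spec_build_process_tree pid_dep (build_process_tree pid_dep)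

-- ===== LEMMAS AND PROOFS =====

-- membership is preserved by the reach iteration
theorem bpt_mem_foldl_update (f : String → List String) (x : String) :
    ∀ (l : List String) (t : PySem.Set String), x ∈ t →
      x ∈ l.foldl (fun t p => PySem.Set.update t (f p)) t := by
  intro l
  induction l with
  | nil => intro t h; exact h
  | cons a l ih =>
      intro t h
      exact ih _ ((PySem.Set.mem_update _ _ _).2 (Or.inl h))

theorem bpt_mem_reach_self (pid_dep : List (String × List (String × Int))) (x : String) :
    ∀ (i : Nat) (s : PySem.Set String), x ∈ s → x ∈ bpt_reach pid_dep i s := by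
  intro i
  induction i with
  | zero => intro s h; exact h
  | succ i ih =>
      intro s h
      exact ih _ (bpt_mem_foldl_update _ _ _ _ h)

theorem bpt_elim_succ (pid_dep : List (String × List (String × Int))) :
    ∀ (i : Nat) (p : String), bpt_elim pid_dep i p = true → bpt_elim pid_dep (i+1) p = true := by
  intro i
  induction i with
  | zero => intro p h; simp [bpt_elim] at h
  | succ i ih =>
      intro p h
      simp only [bpt_elim, List.all_eq_true] at h ⊢
      intro c hc
      rcases Bool.or_eq_true_iff.1 (h c hc) with h' | h'
      · exact Bool.or_eq_true_iff.2 (Or.inl h')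
      · exact Bool.or_eq_true_iff.2 (Or.inr (ih c h'))

theorem bpt_elim_le (pid_dep : List (String × List (String × Int))) {i j : Nat} (hij : i ≤ j)
    {p : String} (h : bpt_elim pid_dep i p = true) : bpt_elim pid_dep j p = true := by
  induction hij with
  | refl => exact h
  | step _ ih => exact bpt_elim_succ pid_dep _ p ih

-- the sorted child list both ports traverse
def bpt_sck (pid_dep : List (String × List (String × Int))) (p : String) : List String :=
  PySem.List.sorted (bpt_childKeys pid_dep p) bpt_key

theorem bpt_subtree_none (pid_dep : List (String × List (String × Int))) {p : String}
    (h : (PySem.Dict.ofList pid_dep).get? p = none) (f : Nat) (l : Int) :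
    bpt_subtree (PySem.Dict.ofList pid_dep) f p l = [(p, l)] := by
  cases f with
  | zero => rfl
  | succ f => simp [bpt_subtree, h]

theorem bpt_subtree_succ (pid_dep : List (String × List (String × Int))) {p : String}
    {children : List (String × Int)}
    (h : (PySem.Dict.ofList pid_dep).get? p = some children) (f : Nat) (l : Int) :
    bpt_subtree (PySem.Dict.ofList pid_dep) (f+1) p l
      = (p, l) :: (bpt_sck pid_dep p).flatMap
          (fun c => bpt_subtree (PySem.Dict.ofList pid_dep) f c (l + 1)) := by
  simp [bpt_subtree, h, bpt_sck, bpt_childKeys, List.flatMap_def]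

theorem bpt_subtree_len_pos (pid_dep : List (String × List (String × Int))) (f : Nat)
    (p : String) (l : Int) :
    1 ≤ (bpt_subtree (PySem.Dict.ofList pid_dep) f p l).length := by
  cases hg : (PySem.Dict.ofList pid_dep).get? p with
  | none => simp [bpt_subtree_none pid_dep hg]
  | some children =>
      cases f with
      | zero => simp [bpt_subtree]
      | succ f => simp [bpt_subtree_succ pid_dep hg]

-- a value stored in dict(pid_dep) is one of the listed values
theorem bpt_get?_foldl_insert_values {l : List (String × List (String × Int))} :
    ∀ (dd : PySem.Dict String (List (String × Int))) {p : String} {v : List (String × Int)},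
      (l.foldl (fun d kv => d.insert kv.1 kv.2) dd).get? p = some v →
      (∃ kv ∈ l, kv.2 = v) ∨ dd.get? p = some v := by
  induction l with
  | nil => intro dd p v h; exact Or.inr h
  | cons a l ih =>
      intro dd p v h
      rcases ih _ h with h' | h'
      · exact Or.inl ⟨h'.choose, List.mem_cons_of_mem _ h'.choose_spec.1, h'.choose_spec.2⟩
      · rw [PySem.Dict.get?_insert] at h'
        by_cases hp : p = a.1
        · simp [hp] at h'
          exact Or.inl ⟨a, List.mem_cons_self, h'⟩
        · simp [hp] at h'
          exact Or.inr h'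

theorem bpt_size_foldl_insert_le {κ ν : Type} [BEq κ] :
    ∀ (l : List (κ × ν)) (dd : PySem.Dict κ ν),
      (l.foldl (fun d kv => d.insert kv.1 kv.2) dd).size ≤ dd.size + l.length := by
  intro l
  induction l with
  | nil => intro dd; simp
  | cons a l ih =>
      intro dd
      calc (List.foldl (fun d kv => d.insert kv.1 kv.2) (dd.insert a.1 a.2) l).size
          ≤ (dd.insert a.1 a.2).size + l.length := ih _
        _ ≤ dd.size + (a :: l).length := by
            rw [PySem.Dict.size_insert]; split <;> simp only [List.length_cons] <;> omega

theorem bpt_keys_length_le (children : List (String × Int)) :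
    (PySem.Dict.keys (PySem.Dict.ofList children)).length ≤ children.length := by
  have h := bpt_size_foldl_insert_le children PySem.Dict.empty
  simpa [PySem.Dict.keys, PySem.Dict.size, PySem.Dict.ofList, PySem.Dict.empty] using h

theorem bpt_size_pos (pid_dep : List (String × List (String × Int))) : 1 ≤ bpt_size pid_dep := by
  have : bpt_size pid_dep = 1 + (pid_dep.map (fun kv => kv.2.length)).sum := by
    rw [bpt_size, PySem.List.foldl_add_nat]
  omega

theorem bpt_childKeys_len_lt (pid_dep : List (String × List (String × Int))) (p : String) :
    (bpt_childKeys pid_dep p).length + 1 ≤ bpt_size pid_dep := by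
  have hS : bpt_size pid_dep = 1 + (pid_dep.map (fun kv => kv.2.length)).sum := by
    rw [bpt_size, PySem.List.foldl_add_nat]
  cases hg : (PySem.Dict.ofList pid_dep).get? p with
  | none => simp [bpt_childKeys, hg]; omega
  | some children =>
      rcases (bpt_get?_foldl_insert_values PySem.Dict.empty hg) with ⟨kv, hkv, hv⟩ | habs
      · have h1 : (bpt_childKeys pid_dep p).length ≤ children.length := by
          simpa [bpt_childKeys, hg] using bpt_keys_length_le children
        have h2 : children.length ≤ (pid_dep.map (fun kv => kv.2.length)).sum := by
          subst hv
          exact List.single_le_sum (by intro x _; omega) _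
            (List.mem_map_of_mem (f := fun kv => kv.2.length) hkv)
        omega
      · simp [PySem.Dict.get?, PySem.Dict.empty] at habs

theorem bpt_subtree_len_le (pid_dep : List (String × List (String × Int))) :
    ∀ (f : Nat) (p : String) (l : Int),
      (bpt_subtree (PySem.Dict.ofList pid_dep) f p l).length ≤ (bpt_size pid_dep) ^ f := by
  intro f
  induction f with
  | zero => intro p l; simp [bpt_subtree]
  | succ f ih =>
      intro p l
      have hS := bpt_size_pos pid_dep
      have hSf : 1 ≤ (bpt_size pid_dep) ^ f := Nat.one_le_pow _ _ (by omega)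
      cases hg : (PySem.Dict.ofList pid_dep).get? p with
      | none =>
          rw [bpt_subtree_none pid_dep hg]
          calc (1:Nat) ≤ 1 ^ (f+1) := by simp
            _ ≤ (bpt_size pid_dep) ^ (f+1) := Nat.pow_le_pow_left hS _
      | some children =>
          rw [bpt_subtree_succ pid_dep hg]
          have hlen : ((bpt_sck pid_dep p).flatMap
              (fun c => bpt_subtree (PySem.Dict.ofList pid_dep) f c (l + 1))).length
              ≤ (bpt_sck pid_dep p).length * (bpt_size pid_dep) ^ f := by
            rw [List.length_flatMap]
            have := List.sum_le_card_nsmul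
              ((bpt_sck pid_dep p).map
                (fun c => (bpt_subtree (PySem.Dict.ofList pid_dep) f c (l + 1)).length))
              ((bpt_size pid_dep) ^ f) (by
                intro x hx
                rcases List.mem_map.1 hx with ⟨c, _, rfl⟩
                exact ih c (l+1))
            simpa [smul_eq_mul] using this
          have hsck : (bpt_sck pid_dep p).length + 1 ≤ bpt_size pid_dep := by
            rw [bpt_sck, PySem.List.length_sorted]
            exact bpt_childKeys_len_lt pid_dep p
          simp only [List.length_cons]
          calc ((bpt_sck pid_dep p).flatMap
                (fun c => bpt_subtree (PySem.Dict.ofList pid_dep) f c (l + 1))).length + 1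
              ≤ (bpt_sck pid_dep p).length * (bpt_size pid_dep) ^ f + 1 := by omega
            _ ≤ (bpt_size pid_dep - 1) * (bpt_size pid_dep) ^ f + (bpt_size pid_dep) ^ f := by
                have : (bpt_sck pid_dep p).length ≤ bpt_size pid_dep - 1 := by omega
                have := Nat.mul_le_mul_right ((bpt_size pid_dep) ^ f) this
                omega
            _ = (bpt_size pid_dep) ^ (f+1) := by
                have h2 : bpt_size pid_dep - 1 + 1 = bpt_size pid_dep := by omega
                calc (bpt_size pid_dep - 1) * (bpt_size pid_dep) ^ f + (bpt_size pid_dep) ^ f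
                    = (bpt_size pid_dep - 1 + 1) * (bpt_size pid_dep) ^ f := by ring
                  _ = (bpt_size pid_dep) ^ (f+1) := by rw [h2]; ring

-- ===== facts about B's pre-built index =====

-- the index's items are exactly the mapped items of dict(pid_dep)
theorem bpt_index_items (pid_dep : List (String × List (String × Int))) :
    (bpt_index pid_dep).items = ((PySem.Dict.ofList pid_dep).items).map
      (fun kv => (kv.1, PySem.List.sorted (PySem.Dict.keys (PySem.Dict.ofList kv.2)) bpt_key)) := by
  have hnd : ((PySem.Dict.ofList pid_dep).items.map (fun kv => kv.1)).Nodup := by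
    have := PySem.Dict.nodup_keys_ofList pid_dep
    simpa [PySem.Dict.keys] using this
  have h := PySem.Dict.items_foldl_insert_fresh
    (l := (PySem.Dict.ofList pid_dep).items)
    (k := fun kv => kv.1)
    (v := fun kv => PySem.List.sorted (PySem.Dict.keys (PySem.Dict.ofList kv.2)) bpt_key)
    (d := PySem.Dict.empty)
    (by intro a _; exact PySem.Dict.contains_empty _) hnd
  have hfold : bpt_index pid_dep
      = (PySem.Dict.ofList pid_dep).items.foldl
          (fun d kv => d.insert kv.1
            (PySem.List.sorted (PySem.Dict.keys (PySem.Dict.ofList kv.2)) bpt_key))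
          PySem.Dict.empty := by
    simp only [bpt_index, PySem.Dict.ofList, PySem.Dict.update, List.foldl_map]
  rw [hfold, h]
  simp [show (PySem.Dict.empty : PySem.Dict String (List String)).items = [] from rfl]

theorem bpt_index_keys (pid_dep : List (String × List (String × Int))) :
    (bpt_index pid_dep).keys = (PySem.Dict.ofList pid_dep).keys := by
  simp [PySem.Dict.keys, bpt_index_items]

-- the index lookup is A's per-node sorted child list
theorem bpt_index_getD (pid_dep : List (String × List (String × Int))) (p : String) :
    (bpt_index pid_dep).getD p [] = bpt_sck pid_dep p := by
  have hndk : (bpt_index pid_dep).keys.Nodup := by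
    rw [bpt_index_keys]; exact PySem.Dict.nodup_keys_ofList pid_dep
  cases hg : (PySem.Dict.ofList pid_dep).get? p with
  | some children =>
      have hmem : (p, PySem.List.sorted (PySem.Dict.keys (PySem.Dict.ofList children)) bpt_key)
          ∈ (bpt_index pid_dep).items := by
        rw [bpt_index_items]
        exact List.mem_map_of_mem (PySem.Dict.mem_items_of_get?_eq_some _ hg)
      rw [PySem.Dict.getD_of_mem_items _ hmem hndk]
      simp [bpt_sck, bpt_childKeys, hg]
  | none =>
      have hnk : p ∉ (bpt_index pid_dep).keys := by
        rw [bpt_index_keys]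
        exact (PySem.Dict.get?_eq_none_iff_not_mem_keys _ _).1 hg
      have hc : (bpt_index pid_dep).contains p = false := by
        rw [PySem.Dict.contains_eq_decide_mem_keys _ _]
        simpa using hnk
      rw [PySem.Dict.getD_of_not_contains _ _ hc]
      simp [bpt_sck, bpt_childKeys, hg, PySem.List.sorted]

-- membership in A's all_children fold, both directions
theorem bpt_mem_foldl_update_iff (f : List (String × Int) → List String) (x : String) :
    ∀ (l : List (List (String × Int))) (s : PySem.Set String),
      x ∈ l.foldl (fun t ch => PySem.Set.update t (f ch)) s ↔ x ∈ s ∨ ∃ ch ∈ l, x ∈ f ch := by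
  intro l
  induction l with
  | nil => intro s; simp
  | cons a l ih =>
      intro s
      rw [List.foldl_cons, ih, PySem.Set.mem_update]
      constructor
      · rintro ((h | h) | ⟨ch, hch, hx⟩)
        · exact Or.inl h
        · exact Or.inr ⟨a, List.mem_cons_self, h⟩
        · exact Or.inr ⟨ch, List.mem_cons_of_mem _ hch, hx⟩
      · rintro (h | ⟨ch, hch, hx⟩)
        · exact Or.inl (Or.inl h)
        · rcases List.mem_cons.1 hch with rfl | hch
          · exact Or.inl (Or.inr hx)
          · exact Or.inr ⟨ch, hch, hx⟩

-- B's flat set comprehension and A's update fold contain the same pids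
theorem bpt_contains_eq (pid_dep : List (String × List (String × Int))) (x : String) :
    PySem.Set.contains
      (PySem.Set.ofList (((bpt_index pid_dep).values).flatMap (fun cs => cs))) x
    = PySem.Set.contains
      ((PySem.Dict.ofList pid_dep).values.foldl
        (fun s children => PySem.Set.update s (PySem.Dict.keys (PySem.Dict.ofList children)))
        (PySem.Set.empty : PySem.Set String)) x := by
  have hvals : (bpt_index pid_dep).values
      = ((PySem.Dict.ofList pid_dep).items).map
          (fun kv => PySem.List.sorted (PySem.Dict.keys (PySem.Dict.ofList kv.2)) bpt_key) := by
    simp [PySem.Dict.values, bpt_index_items]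
  have hiff : x ∈ PySem.Set.ofList (((bpt_index pid_dep).values).flatMap (fun cs => cs))
      ↔ x ∈ (PySem.Dict.ofList pid_dep).values.foldl
          (fun s children => PySem.Set.update s (PySem.Dict.keys (PySem.Dict.ofList children)))
          (PySem.Set.empty : PySem.Set String) := by
    rw [PySem.Set.mem_ofList, bpt_mem_foldl_update_iff]
    rw [hvals]
    constructor
    · intro h
      rcases List.mem_flatMap.1 h with ⟨cs, hcs, hx⟩
      rcases List.mem_map.1 hcs with ⟨kv, hkv, rfl⟩
      refine Or.inr ⟨kv.2, ?_, (PySem.List.mem_sorted _ _ _ _).1 hx⟩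
      simpa [PySem.Dict.values] using List.mem_map_of_mem (f := fun kv => kv.2) hkv
    · rintro (h | ⟨ch, hch, hx⟩)
      · simp [PySem.Set.empty] at h
      · simp only [PySem.Dict.values] at hch
        rcases List.mem_map.1 hch with ⟨kv, hkv, rfl⟩
        exact List.mem_flatMap.2
          ⟨PySem.List.sorted (PySem.Dict.keys (PySem.Dict.ofList kv.2)) bpt_key,
            List.mem_map_of_mem hkv, (PySem.List.mem_sorted _ _ _ _).2 hx⟩
  rw [Bool.eq_iff_iff, PySem.Set.contains_iff, PySem.Set.contains_iff]
  exact hiff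

-- B's root filter is A's bpt_roots
theorem bpt_roots_eq (pid_dep : List (String × List (String × Int))) :
    ((bpt_index pid_dep).keys).filter
      (fun p => !(PySem.Set.contains
        (PySem.Set.ofList (((bpt_index pid_dep).values).flatMap (fun cs => cs))) p))
    = bpt_roots pid_dep := by
  rw [bpt_index_keys]
  show _ = ((PySem.Dict.ofList pid_dep).keys).filter _
  apply List.filter_congr
  intro p _
  rw [bpt_contains_eq]

-- the main invariant: the explicit stack with per-entry depth budgets flattens to the
-- recursive subtrees, one output element per loop step
theorem bpt_loop_eq (pid_dep : List (String × List (String × Int))) :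
    ∀ (N : Nat) (fs : List (String × Int × Nat)),
      (fs.map (fun e => (bpt_subtree (PySem.Dict.ofList pid_dep) e.2.2 e.1 e.2.1).length)).sum ≤ N →
      (∀ e ∈ fs, (PySem.Dict.ofList pid_dep).contains e.1 = true →
        bpt_elim pid_dep e.2.2 e.1 = true) →
      bpt_loop (bpt_index pid_dep) N (fs.map (fun e => (e.1, e.2.1)))
        = fs.flatMap (fun e => bpt_subtree (PySem.Dict.ofList pid_dep) e.2.2 e.1 e.2.1) := by
  intro N
  induction N with
  | zero =>
      intro fs hsum hinv
      cases fs with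
      | nil => rfl
      | cons e fs =>
          exfalso
          have := bpt_subtree_len_pos pid_dep e.2.2 e.1 e.2.1
          simp only [List.map_cons, List.sum_cons] at hsum
          omega
  | succ N ih =>
      intro fs hsum hinv
      cases fs with
      | nil => rfl
      | cons e rest =>
          obtain ⟨p, l, f⟩ := e
          have hstep : bpt_loop (bpt_index pid_dep) (N+1)
              ((⟨p, l, f⟩ :: rest).map (fun e => (e.1, e.2.1)))
              = (p, l) :: bpt_loop (bpt_index pid_dep) N
                  ((bpt_sck pid_dep p).map (fun c => (c, l + 1))
                    ++ rest.map (fun e => (e.1, e.2.1))) := by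
            simp only [List.map_cons, bpt_loop, bpt_index_getD]
          cases hg : (PySem.Dict.ofList pid_dep).get? p with
          | none =>
              have hsck : bpt_sck pid_dep p = [] := by
                simp [bpt_sck, bpt_childKeys, hg, PySem.List.sorted]
              rw [hstep, hsck]
              simp only [List.map_nil, List.nil_append]
              rw [ih rest (by
                  have := bpt_subtree_len_pos pid_dep f p l
                  simp at hsum ⊢; omega)
                (fun e he hc => hinv e (List.mem_cons_of_mem _ he) hc)]
              simp [bpt_subtree_none pid_dep hg f l]
          | some children =>
              have hcont : (PySem.Dict.ofList pid_dep).contains p = true := by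
                rw [PySem.Dict.contains_eq_isSome_get?, hg]; rfl
              have helim : bpt_elim pid_dep f p = true := hinv _ List.mem_cons_self hcont
              cases f with
              | zero => simp [bpt_elim] at helim
              | succ f =>
                -- the pushed entries, with depth budget f
                set fs' : List (String × Int × Nat) :=
                  (bpt_sck pid_dep p).map (fun c => (c, l + 1, f)) ++ rest with hfs'
                have hstrip : (bpt_sck pid_dep p).map (fun c => (c, l + 1)) ++
                    rest.map (fun e => (e.1, e.2.1)) = fs'.map (fun e => (e.1, e.2.1)) := by
                  simp [hfs', Function.comp]
                have hsum' : (fs'.map (fun e =>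
                    (bpt_subtree (PySem.Dict.ofList pid_dep) e.2.2 e.1 e.2.1).length)).sum ≤ N := by
                  have hlen : (bpt_subtree (PySem.Dict.ofList pid_dep) (f+1) p l).length
                      = 1 + ((bpt_sck pid_dep p).map (fun c =>
                          (bpt_subtree (PySem.Dict.ofList pid_dep) f c (l + 1)).length)).sum := by
                    rw [bpt_subtree_succ pid_dep hg]
                    simp only [List.length_cons, List.length_flatMap]
                    omega
                  have hsplit : (fs'.map (fun e =>
                      (bpt_subtree (PySem.Dict.ofList pid_dep) e.2.2 e.1 e.2.1).length)).sum
                      = ((bpt_sck pid_dep p).map (fun c =>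
                          (bpt_subtree (PySem.Dict.ofList pid_dep) f c (l + 1)).length)).sum
                        + (rest.map (fun e =>
                          (bpt_subtree (PySem.Dict.ofList pid_dep) e.2.2 e.1 e.2.1).length)).sum := by
                    simp [hfs', Function.comp_def]
                  simp only [List.map_cons, List.sum_cons] at hsum
                  omega
                have hinv' : ∀ e ∈ fs', (PySem.Dict.ofList pid_dep).contains e.1 = true →
                    bpt_elim pid_dep e.2.2 e.1 = true := by
                  intro e he hc
                  rcases List.mem_append.1 he with he | he
                  · rcases List.mem_map.1 he with ⟨c, hcmem, rfl⟩
                    have hcmem' : c ∈ bpt_childKeys pid_dep p :=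
                      (PySem.List.mem_sorted _ _ _ _).1 hcmem
                    have hall : ∀ x ∈ bpt_childKeys pid_dep p,
                        (PySem.Dict.ofList pid_dep).contains x = false
                        ∨ bpt_elim pid_dep f x = true := by
                      simpa [bpt_elim] using helim
                    rcases hall c hcmem' with h' | h'
                    · rw [hc] at h'; cases h'
                    · exact h'
                  · exact hinv e (List.mem_cons_of_mem _ he) hc
                rw [hstep, hstrip, ih fs' hsum' hinv']
                rw [List.flatMap_cons, bpt_subtree_succ pid_dep hg]
                simp [hfs', List.flatMap_append, List.flatMap_map]

-- A's root loop as a flatMap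
theorem bpt_A_eq (pid_dep : List (String × List (String × Int))) :
    build_process_tree pid_dep
      = (PySem.List.sorted (bpt_roots pid_dep) bpt_key).flatMap
          (fun r => bpt_subtree (PySem.Dict.ofList pid_dep) (pid_dep.length + 1) r 0) := by
  show (PySem.List.sorted (bpt_roots pid_dep) bpt_key).foldl
      (fun full_tree root =>
        full_tree ++ bpt_subtree (PySem.Dict.ofList pid_dep) (pid_dep.length + 1) root 0) [] = _
  rw [PySem.List.foldl_append_eq_flatMap, List.nil_append]

-- B unfolded, with its root filter rewritten to bpt_roots
theorem bpt_B_eq (pid_dep : List (String × List (String × Int))) :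
    build_process_tree_alt pid_dep
      = bpt_loop (bpt_index pid_dep)
          ((((PySem.List.sorted (bpt_roots pid_dep) bpt_key).map
              (fun r => (r, (0 : Int)))).length + 1)
            * (bpt_size pid_dep) ^ (pid_dep.length + 1))
          ((PySem.List.sorted (bpt_roots pid_dep) bpt_key).map (fun r => (r, (0 : Int)))) := by
  show bpt_loop (bpt_index pid_dep) _ _ = _
  rw [bpt_roots_eq]

theorem bpt_main (pid_dep : List (String × List (String × Int)))
    (hpre : Pre_build_process_tree pid_dep) :
    build_process_tree pid_dep = build_process_tree_alt pid_dep := by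
  set fs : List (String × Int × Nat) :=
    (PySem.List.sorted (bpt_roots pid_dep) bpt_key).map
      (fun r => (r, (0 : Int), pid_dep.length + 1)) with hfs
  have hstack : (PySem.List.sorted (bpt_roots pid_dep) bpt_key).map (fun r => (r, (0 : Int)))
      = fs.map (fun e => (e.1, e.2.1)) := by
    simp [hfs, Function.comp_def]
  have hsum : (fs.map (fun e =>
      (bpt_subtree (PySem.Dict.ofList pid_dep) e.2.2 e.1 e.2.1).length)).sum
      ≤ (fs.length + 1) * (bpt_size pid_dep) ^ (pid_dep.length + 1) := by
    have hcard := List.sum_le_card_nsmul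
      (fs.map (fun e => (bpt_subtree (PySem.Dict.ofList pid_dep) e.2.2 e.1 e.2.1).length))
      ((bpt_size pid_dep) ^ (pid_dep.length + 1)) (by
        intro x hx
        rcases List.mem_map.1 hx with ⟨e, he, rfl⟩
        rw [hfs] at he
        rcases List.mem_map.1 he with ⟨r, hr, rfl⟩
        exact bpt_subtree_len_le pid_dep (pid_dep.length + 1) r 0)
    simp only [smul_eq_mul, List.length_map] at hcard
    have hmul : fs.length * (bpt_size pid_dep) ^ (pid_dep.length + 1)
        ≤ (fs.length + 1) * (bpt_size pid_dep) ^ (pid_dep.length + 1) :=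
      Nat.mul_le_mul_right _ (Nat.le_succ _)
    omega
  have hinv : ∀ e ∈ fs, (PySem.Dict.ofList pid_dep).contains e.1 = true →
      bpt_elim pid_dep e.2.2 e.1 = true := by
    intro e he _
    rw [hfs] at he
    rcases List.mem_map.1 he with ⟨r, hr, rfl⟩
    have hrroots : r ∈ bpt_roots pid_dep := (PySem.List.mem_sorted _ _ _ _).1 hr
    have hrkeys : r ∈ PySem.Dict.keys (PySem.Dict.ofList pid_dep) := by
      exact (List.mem_filter.1 hrroots).1
    have hreach : r ∈ bpt_reach pid_dep (bpt_size pid_dep + pid_dep.length + 1)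
        (PySem.Set.ofList (bpt_roots pid_dep)) :=
      bpt_mem_reach_self pid_dep r _ _ ((PySem.Set.mem_ofList _ _).2 hrroots)
    exact bpt_elim_le pid_dep (Nat.le_succ _) (hpre r hrkeys hreach)
  have key := bpt_loop_eq pid_dep
    ((fs.length + 1) * (bpt_size pid_dep) ^ (pid_dep.length + 1)) fs hsum hinv
  rw [bpt_A_eq, bpt_B_eq, hstack]
  simp only [List.length_map]
  rw [key, hfs, List.flatMap_map]

-- ===== VERDICT (by name: the statement is the Claim_ definition above) =====
theorem build_process_tree_spec : Claim_equal_build_process_tree := by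
  intro pid_dep _ hpre
  exact bpt_main pid_dep hpre
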